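-- pv_equiv track=rewrite | github.com/michaelhaddad-code/pbi-dax-query-agent | skills/dax_query_builder.py | find_visual
-- ===== SOURCE A (Python) =====
-- def find_visual(visuals, search_term):
--     """Find a visual by name (case-insensitive, partial match).
--
--     Matches against visual_name (from data dict) and against "page / visual" combined.
--     Returns: list of keys that match, best matches first.
--     """
--     search_lower = search_term.lower()
--     exact = []
--     partial = []
--
--     for key, data in visuals.items():
--         page = key[0]
--         visual_name = data["visual_name"]
--         name_lower = visual_name.lower()
--         full_lower = f"{page} / {visual_name}".lower()
--         if name_lower == search_lower or full_lower == search_lower: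
--             exact.append(key)
--         elif search_lower in name_lower or search_lower in full_lower:
--             partial.append(key)
--
--     return exact + partial
-- ===== SOURCE B (Python) =====
-- def find_visual(visuals, search_term):
--     """Find a visual by name (case-insensitive, partial match): exact matches first,
--     via two filtering passes (exact predicate, then partial = substring and not exact)."""
--     s = search_term.lower()
--
--     def is_exact(key, data):
--         name = data["visual_name"]
--         return name.lower() == s or f"{key[0]} / {name}".lower() == s
--
--     def is_partial(key, data):
--         name = data["visual_name"]
--         return (s in name.lower() or s in f"{key[0]} / {name}".lower()) \
--             and not is_exact(key, data)
--
--     return [k for k, d in visuals.items() if is_exact(k, d)] + \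
--            [k for k, d in visuals.items() if is_partial(k, d)]
-- ===== Notes on version B (the rewrite author's own statement) =====
-- stated objective: simpler
-- what changed: Replaces the single loop that partitions into two accumulator lists with two declarative filtering passes (an exact-match predicate and a partial-and-not-exact predicate) whose results are concatenated.
import Mathlib
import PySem

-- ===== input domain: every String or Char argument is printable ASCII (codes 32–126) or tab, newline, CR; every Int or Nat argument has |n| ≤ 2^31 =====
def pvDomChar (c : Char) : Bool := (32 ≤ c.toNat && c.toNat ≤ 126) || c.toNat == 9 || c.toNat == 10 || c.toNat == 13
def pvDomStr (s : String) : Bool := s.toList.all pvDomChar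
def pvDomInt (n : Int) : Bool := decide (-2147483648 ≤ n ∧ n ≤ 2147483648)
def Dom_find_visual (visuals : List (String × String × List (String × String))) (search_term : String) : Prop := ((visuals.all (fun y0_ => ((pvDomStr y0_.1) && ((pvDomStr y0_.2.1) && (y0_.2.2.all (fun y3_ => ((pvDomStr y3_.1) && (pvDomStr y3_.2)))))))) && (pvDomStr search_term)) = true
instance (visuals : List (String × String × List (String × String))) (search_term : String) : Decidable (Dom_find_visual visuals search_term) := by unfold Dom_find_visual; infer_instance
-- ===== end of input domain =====

-- B replaces A's single partitioning loop with two declarative filter passes (exact, then partial-and-not-exact), concatenated: simpler decomposition, same cost.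


-- ===== PORT A =====
def find_visual (visuals : List (String × String × List (String × String))) (search_term : String) : List (String × String) :=
  let search_lower := PySem.Str.lower search_term
  let res := visuals.foldl
    (fun (acc : List (String × String) × List (String × String)) item =>
      let page := item.1
      let visual_name := (PySem.Dict.mk item.2.2).getD "visual_name" ""
      let name_lower := PySem.Str.lower visual_name
      let full_lower := PySem.Str.lower (page ++ " / " ++ visual_name)
      if name_lower == search_lower || full_lower == search_lower then
        (acc.1 ++ [(item.1, item.2.1)], acc.2)
      else if PySem.Str.isIn search_lower name_lower || PySem.Str.isIn search_lower full_lower then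
        (acc.1, acc.2 ++ [(item.1, item.2.1)])
      else acc)
    ([], [])
  res.1 ++ res.2

-- ===== PORT B =====
def fvIsExact (s : String) (item : String × String × List (String × String)) : Bool :=
  let name := (PySem.Dict.mk item.2.2).getD "visual_name" ""
  PySem.Str.lower name == s || PySem.Str.lower (item.1 ++ " / " ++ name) == s

def fvIsPartial (s : String) (item : String × String × List (String × String)) : Bool :=
  let name := (PySem.Dict.mk item.2.2).getD "visual_name" ""
  (PySem.Str.isIn s (PySem.Str.lower name)
    || PySem.Str.isIn s (PySem.Str.lower (item.1 ++ " / " ++ name)))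
  && !(fvIsExact s item)

def find_visual_alt (visuals : List (String × String × List (String × String))) (search_term : String) : List (String × String) :=
  let s := PySem.Str.lower search_term
  (visuals.filter (fvIsExact s)).map (fun it => (it.1, it.2.1))
    ++ (visuals.filter (fvIsPartial s)).map (fun it => (it.1, it.2.1))

-- ===== PRECONDITION & SPEC =====
-- Pre_ excludes exactly the inputs on which Python A raises KeyError: some visual's data dict lacks the "visual_name" key.
def Pre_find_visual (visuals : List (String × String × List (String × String))) (search_term : String) : Prop :=
  ∀ item ∈ visuals, "visual_name" ∈ item.2.2.map Prod.fst
instance (visuals : List (String × String × List (String × String))) (search_term : String) : Decidable (Pre_find_visual visuals search_term) := by unfold Pre_find_visual; infer_instance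
def pvWitness_find_visual : (List (String × String × List (String × String))) × String :=
  ([("Page 1", "v1", [("visual_name", "Sales Chart")]), ("Page 2", "v2", [("visual_name", "Costs")])], "sales chart")

def Spec_find_visual (visuals : List (String × String × List (String × String))) (search_term : String) (out : List (String × String)) : Prop := out = find_visual_alt visuals search_term
instance (visuals : List (String × String × List (String × String))) (search_term : String) (out : List (String × String)) : Decidable (Spec_find_visual visuals search_term out) := by unfold Spec_find_visual; infer_instance

-- ===== CLAIM (what is proved, stated in full; the proofs are below) =====
def Claim_equal_find_visual : Prop := ∀ (visuals : List (String × String × List (String × String))) (search_term : String), Dom_find_visual visuals search_term → Pre_find_visual visuals search_term → Spec_find_visual visuals search_term (find_visual visuals search_term)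

-- ===== LEMMAS AND PROOFS =====

lemma fv_foldl_inv (s : String) (l : List (String × String × List (String × String)))
    (e p : List (String × String)) :
    l.foldl
      (fun (acc : List (String × String) × List (String × String)) item =>
        let page := item.1
        let visual_name := (PySem.Dict.mk item.2.2).getD "visual_name" ""
        let name_lower := PySem.Str.lower visual_name
        let full_lower := PySem.Str.lower (page ++ " / " ++ visual_name)
        if name_lower == s || full_lower == s then
          (acc.1 ++ [(item.1, item.2.1)], acc.2)
        else if PySem.Str.isIn s name_lower || PySem.Str.isIn s full_lower then
          (acc.1, acc.2 ++ [(item.1, item.2.1)])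
        else acc)
      (e, p)
    = (e ++ (l.filter (fvIsExact s)).map (fun it => (it.1, it.2.1)),
       p ++ (l.filter (fvIsPartial s)).map (fun it => (it.1, it.2.1))) := by
  induction l generalizing e p with
  | nil => simp
  | cons x xs ih =>
    simp only [List.foldl_cons, List.filter_cons]
    by_cases hex : fvIsExact s x = true
    · have hcond := hex
      simp only [fvIsExact] at hcond
      have hpar : fvIsPartial s x = false := by
        simp only [fvIsPartial, hex]
        exact Bool.and_false _
      simp only [hcond, if_true]
      rw [ih]
      simp [hex, hpar]
    · have hex' : fvIsExact s x = false := by simpa using hex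
      have hcond := hex'
      simp only [fvIsExact] at hcond
      by_cases hin : (PySem.Str.isIn s (PySem.Str.lower ((PySem.Dict.mk x.2.2).getD "visual_name" ""))
          || PySem.Str.isIn s (PySem.Str.lower (x.1 ++ " / " ++ (PySem.Dict.mk x.2.2).getD "visual_name" ""))) = true
      · have hpar : fvIsPartial s x = true := by
          simp only [fvIsPartial]
          rw [hin, hex']
          rfl
        simp only [hcond, if_false, Bool.false_eq_true, hin, if_true]
        rw [ih]
        simp [hex', hpar]
      · have hin' : (PySem.Str.isIn s (PySem.Str.lower ((PySem.Dict.mk x.2.2).getD "visual_name" ""))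
            || PySem.Str.isIn s (PySem.Str.lower (x.1 ++ " / " ++ (PySem.Dict.mk x.2.2).getD "visual_name" ""))) = false := by
          exact Bool.not_eq_true _ ▸ hin
        have hpar : fvIsPartial s x = false := by
          simp only [fvIsPartial]
          rw [hin']
          exact Bool.false_and _
        simp only [hcond, Bool.false_eq_true, if_false, hin']
        rw [ih]
        simp [hex', hpar]

-- ===== VERDICT (by name: the statement is the Claim_ definition above) =====
theorem find_visual_spec : Claim_equal_find_visual := by
  intro visuals search_term _hdom _hpre
  simp only [Spec_find_visual, find_visual, find_visual_alt]
  rw [fv_foldl_inv]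
  simp
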